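-- pv_equiv track=rewrite | github.com/zhouj8553/Web_to_SFT | code/utils.py | merge_predictions
-- ===== SOURCE A (Python) =====
-- def merge_predictions(examples_list, model_name_list, register_cols = ["output","is_correct"]):
--     new_examples = []
--     for i in range(len(examples_list)):
--         examples = examples_list[i]
--         model_name = model_name_list[i]
--         for (e_idx,e) in enumerate(examples):
--             if i==0:
--                 new_examples.append({x:y for (x,y) in e.items() if x not in register_cols})
--             for col in register_cols:
--                 new_examples[e_idx]["{}_{}".format(model_name,col)] = e[col]
--     return new_examples
-- ===== SOURCE B (Python) =====
-- def merge_predictions(examples_list, model_name_list, register_cols = ["output","is_correct"]):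
--     if not examples_list:
--         return []
--     pairs = list(zip(model_name_list, examples_list))
--     merged = []
--     for e_idx, e0 in enumerate(examples_list[0]):
--         d = {x: y for x, y in e0.items() if x not in register_cols}
--         for model_name, examples in pairs:
--             if e_idx < len(examples):
--                 e = examples[e_idx]
--                 for col in register_cols:
--                     d["{}_{}".format(model_name, col)] = e[col]
--         merged.append(d)
--     return merged
-- ===== Notes on version B (the rewrite author's own statement) =====
-- stated objective: alternative
-- what changed: A iterates model-major, appending base dicts on the first model pass and then mutating new_examples[e_idx] in place on every later pass; B transposes the traversal to example-major: for each example position it builds that one output dict completely (base keys, then every model's columns via zip) and appends it once, so no indexed mutation of the result list ever happens.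
import Mathlib
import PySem

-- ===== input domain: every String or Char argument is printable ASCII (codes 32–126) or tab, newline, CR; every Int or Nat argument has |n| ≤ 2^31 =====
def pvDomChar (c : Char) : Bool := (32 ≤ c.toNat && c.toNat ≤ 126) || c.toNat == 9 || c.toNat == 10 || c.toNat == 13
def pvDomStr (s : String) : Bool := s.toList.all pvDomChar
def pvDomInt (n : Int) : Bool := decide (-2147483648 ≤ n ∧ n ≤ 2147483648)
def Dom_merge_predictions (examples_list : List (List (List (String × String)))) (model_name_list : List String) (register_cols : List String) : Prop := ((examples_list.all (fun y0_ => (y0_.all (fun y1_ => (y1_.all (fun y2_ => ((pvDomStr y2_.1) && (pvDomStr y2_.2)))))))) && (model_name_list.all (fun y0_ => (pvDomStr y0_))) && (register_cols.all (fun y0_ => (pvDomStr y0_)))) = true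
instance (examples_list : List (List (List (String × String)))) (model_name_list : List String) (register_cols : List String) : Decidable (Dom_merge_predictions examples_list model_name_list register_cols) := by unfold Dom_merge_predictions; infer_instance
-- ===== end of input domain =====

-- B transposes A's model-major traversal (append base dicts on the first model pass, then mutate
-- new_examples[e_idx] on every later pass) into an example-major one: each output dict is built
-- completely — base keys, then every model's columns via zip — and appended once (objective:
-- alternative; same asymptotic cost). Equality of the RETURN value is what is proved.

-- ===== PORT A =====
-- {x:y for (x,y) in e.items() if x not in register_cols}  (dict comprehension over a dict's items;
-- keys are distinct, so the comprehension is the filtered item list as a dict)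
def pvBaseDict (register_cols : List String) (e : PySem.Dict String String) : PySem.Dict String String :=
  PySem.Dict.ofList (e.items.filter (fun p => !(register_cols.contains p.1)))

-- for col in register_cols: d["{}_{}".format(model_name, col)] = e[col]
-- (e[col] raises KeyError when absent: PySem.Dict.get? is none there — excluded by Pre_)
def pvFillCols (model_name : String) (register_cols : List String) (e : PySem.Dict String String) (d : PySem.Dict String String) : PySem.Dict String String :=
  register_cols.foldl (fun d col => d.insert (PySem.Str.join "_" [model_name, col]) ((e.get? col).getD "")) d

def merge_predictions (examples_list : List (List (List (String × String)))) (model_name_list : List String) (register_cols : List String) : List (List (String × String)) :=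
  ((List.range examples_list.length).foldl (fun new_examples (i : Nat) =>
      -- examples = examples_list[i] (i always in range); model_name = model_name_list[i]
      -- (model_name_list[i] raises IndexError when i ≥ len: pyGet? is none there — excluded by Pre_)
      (PySem.List.enumerate (((PySem.List.pyGet? examples_list (i : Int)).getD []).map PySem.Dict.ofList)).foldl
        (fun new_examples p =>
          -- if i==0: append the base dict;  new_examples[e_idx][…] = … (IndexError when e_idx is
          -- out of range — excluded by Pre_)
          (if i = 0 then new_examples ++ [pvBaseDict register_cols p.2] else new_examples).modify
            p.1.toNat
            (pvFillCols ((PySem.List.pyGet? model_name_list (i : Int)).getD "") register_cols p.2))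
        new_examples)
    []).map PySem.Dict.items

-- ===== PORT B =====
def merge_predictions_alt (examples_list : List (List (List (String × String)))) (model_name_list : List String) (register_cols : List String) : List (List (String × String)) :=
  match examples_list with
  | [] => []
  | first :: _ =>
    -- pairs = list(zip(model_name_list, examples_list))
    let pairs := model_name_list.zip examples_list
    -- for e_idx, e0 in enumerate(examples_list[0]): build that one output dict completely, append once
    ((PySem.List.enumerate (first.map PySem.Dict.ofList)).foldl (fun merged p =>
        merged ++ [pairs.foldl (fun d q =>
            -- if e_idx < len(examples): e = examples[e_idx]; write this model's columns
            if p.1 < (q.2.length : Int) then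
              pvFillCols q.1 register_cols (PySem.Dict.ofList ((PySem.List.pyGet? q.2 p.1).getD [])) d
            else d)
          (pvBaseDict register_cols p.2)])
      []).map PySem.Dict.items

-- ===== PRECONDITION & SPEC =====
-- Pre_ excludes exactly the inputs where A raises: IndexError from model_name_list[i] when
-- model_name_list is shorter than examples_list, IndexError from new_examples[e_idx] when a later
-- example list is longer than the first (only reached when register_cols is nonempty), and
-- KeyError from e[col] when a register col is missing.
def Pre_merge_predictions (examples_list : List (List (List (String × String)))) (model_name_list : List String) (register_cols : List String) : Prop :=
  examples_list.length ≤ model_name_list.length ∧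
  (register_cols ≠ [] → ∀ ex ∈ examples_list, ex.length ≤ (examples_list.headD []).length) ∧
  (∀ ex ∈ examples_list, ∀ e ∈ ex, ∀ c ∈ register_cols, (PySem.Dict.ofList e).contains c = true)
instance (examples_list : List (List (List (String × String)))) (model_name_list : List String) (register_cols : List String) : Decidable (Pre_merge_predictions examples_list model_name_list register_cols) := by unfold Pre_merge_predictions; infer_instance

def pvWitness_merge_predictions : (List (List (List (String × String)))) × List String × List String :=
  ([[[("q", "2+2"), ("output", "4"), ("is_correct", "yes")],
     [("q", "2+3"), ("output", "6"), ("is_correct", "no")]],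
    [[("q", "2+2"), ("output", "5"), ("is_correct", "no")]]],
   ["m1", "m2"], ["output", "is_correct"])

def Spec_merge_predictions (examples_list : List (List (List (String × String)))) (model_name_list : List String) (register_cols : List String) (out : List (List (String × String))) : Prop := out = merge_predictions_alt examples_list model_name_list register_cols
instance (examples_list : List (List (List (String × String)))) (model_name_list : List String) (register_cols : List String) (out : List (List (String × String))) : Decidable (Spec_merge_predictions examples_list model_name_list register_cols out) := by unfold Spec_merge_predictions; infer_instance

-- ===== CLAIM (what is proved, stated in full; the proofs are below) =====
def Claim_equal_merge_predictions : Prop := ∀ (examples_list : List (List (List (String × String)))) (model_name_list : List String) (register_cols : List String), Dom_merge_predictions examples_list model_name_list register_cols → Pre_merge_predictions examples_list model_name_list register_cols → Spec_merge_predictions examples_list model_name_list register_cols (merge_predictions examples_list model_name_list register_cols)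

-- ===== LEMMAS AND PROOFS =====

-- one model's per-row write (B's inner step, with the index already a Nat)
def pvStep (cols : List String) (j : Nat) (d : PySem.Dict String String) (q : String × List (List (String × String))) : PySem.Dict String String :=
  if j < q.2.length then pvFillCols q.1 cols (PySem.Dict.ofList (q.2.getD j [])) d else d

-- setting at the seam of an append
theorem pv_modify_append_cons {α : Type} (s : List α) (a : α) (t : List α) (f : α → α) :
    (s ++ a :: t).modify s.length f = s ++ f a :: t := by
  induction s with
  | nil => simp [List.modify]
  | cons x s ih => simpa [List.modify] using ih

-- A's i = 0 pass: interleaved append-then-set equals map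
theorem pv_pass0 (m : String) (cols : List String) :
    ∀ (ex : List (PySem.Dict String String)) (s : List (PySem.Dict String String)),
    (PySem.List.enumerate ex (s.length : Int)).foldl
        (fun ne p => (ne ++ [pvBaseDict cols p.2]).modify p.1.toNat (pvFillCols m cols p.2)) s
      = s ++ ex.map (fun e => pvFillCols m cols e (pvBaseDict cols e)) := by
  intro ex
  induction ex with
  | nil => intro s; simp [PySem.List.enumerate_nil]
  | cons e ex ih =>
    intro s
    rw [PySem.List.enumerate_cons]
    simp only [List.foldl_cons, Int.toNat_natCast]
    rw [pv_modify_append_cons s _ [] _]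
    have h1 : ((s.length : Int) + 1) = ((s ++ [pvFillCols m cols e (pvBaseDict cols e)]).length : Int) := by
      simp
    rw [h1, ih (s ++ [pvFillCols m cols e (pvBaseDict cols e)])]
    simp

-- a modify pass whose indices all lie past the end is the identity
theorem pv_pass_oob {α β : Type} (F : α → β → β) :
    ∀ (ex : List α) (k : Nat) (t : List β), t.length ≤ k →
    (PySem.List.enumerate ex (k : Int)).foldl (fun ne p => ne.modify p.1.toNat (F p.2)) t = t := by
  intro ex
  induction ex with
  | nil => intro k t _; simp [PySem.List.enumerate_nil]
  | cons e ex ih =>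
    intro k t hk
    rw [PySem.List.enumerate_cons]
    simp only [List.foldl_cons, Int.toNat_natCast]
    rw [List.modify_eq_self (by omega)]
    have h1 : ((k : Int) + 1) = (((k + 1 : Nat)) : Int) := by push_cast; ring
    rw [h1]
    exact ih (k + 1) t (by omega)

-- A's later passes: a modify pass starting at offset t.length acts only on the tail s,
-- and there it is zipWith plus the untouched remainder
theorem pv_pass_split {α β : Type} (F : α → β → β) :
    ∀ (ex : List α) (t s : List β),
    (PySem.List.enumerate ex ((t.length : Int))).foldl (fun ne p => ne.modify p.1.toNat (F p.2)) (t ++ s)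
      = t ++ (List.zipWith F ex s ++ s.drop ex.length) := by
  intro ex
  induction ex with
  | nil => intro t s; simp [PySem.List.enumerate_nil]
  | cons e ex ih =>
    intro t s
    rw [PySem.List.enumerate_cons]
    simp only [List.foldl_cons, Int.toNat_natCast]
    match s with
    | [] =>
      rw [List.append_nil, List.modify_eq_self (by omega)]
      have h1 : ((t.length : Int) + 1) = (((t.length + 1 : Nat)) : Int) := by push_cast; ring
      rw [h1, pv_pass_oob F ex (t.length + 1) t (by omega)]
      simp
    | d :: s' =>
      rw [pv_modify_append_cons t d s' (F e)]
      have h2 : t ++ F e d :: s' = (t ++ [F e d]) ++ s' := by simp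
      have h1 : ((t.length : Int) + 1) = (((t ++ [F e d]).length : Nat) : Int) := by simp
      rw [h2, h1, ih (t ++ [F e d]) s']
      simp

-- pointwise value of one zipWith-plus-remainder pass
theorem pv_applyPass_get {α β : Type} (F : α → β → β) :
    ∀ (ex : List α) (s : List β) (j : Nat),
    (List.zipWith F ex s ++ s.drop ex.length)[j]?
      = (s[j]?).map (fun d => if h : j < ex.length then F ex[j] d else d) := by
  intro ex
  induction ex with
  | nil => intro s j; simp
  | cons e ex ih =>
    intro s j
    match s with
    | [] => simp
    | d :: s' =>
      match j with
      | 0 => simp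
      | j + 1 => simpa using ih s' j

-- chaining the passes: the fold of passes, read at index j, is the fold of per-row steps
theorem pv_chain (cols : List String) :
    ∀ (L : List (String × List (List (String × String)))) (s : List (PySem.Dict String String)) (j : Nat),
    (L.foldl (fun s q =>
        List.zipWith (fun e d => pvFillCols q.1 cols e d) (q.2.map PySem.Dict.ofList) s
          ++ s.drop (q.2.map PySem.Dict.ofList).length) s)[j]?
      = (s[j]?).map (fun d => L.foldl (fun d q => pvStep cols j d q) d) := by
  intro L
  induction L with
  | nil => intro s j; simp
  | cons q L ih =>
    intro s j
    rw [List.foldl_cons, ih, pv_applyPass_get]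
    rw [Option.map_map]
    apply congrArg (fun f => Option.map f s[j]?)
    funext d
    rw [List.foldl_cons]
    apply congrArg (fun d => L.foldl (fun d q => pvStep cols j d q) d)
    beta_reduce
    by_cases h : j < q.2.length
    · rw [dif_pos (by simpa using h)]
      unfold pvStep
      rw [if_pos h]
      congr 1
      rw [List.getElem_map]
      congr 1
      exact (List.getD_eq_getElem q.2 [] h).symm
    · rw [dif_neg (by simp only [List.length_map]; exact h)]
      unfold pvStep
      rw [if_neg h]

-- a range-indexed fold equals the zip fold when the index list is long enough
theorem pv_range_zip {σ : Type}
    (h : List (List (String × String)) → String → σ → σ) :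
    ∀ (xs : List (List (List (String × String)))) (ys : List String) (s : σ),
    xs.length ≤ ys.length →
    (List.range xs.length).foldl (fun s j => h (xs[j]?.getD []) (ys[j]?.getD "") s) s
      = (ys.zip xs).foldl (fun s q => h q.2 q.1 s) s := by
  intro xs
  induction xs with
  | nil => intro ys s _; simp
  | cons x xs ih =>
    intro ys s hlen
    match ys with
    | [] => simp at hlen
    | y :: ys =>
      rw [List.length_cons, List.range_succ_eq_map, List.foldl_cons, List.foldl_map]
      simp only [List.getElem?_cons_zero, Option.getD_some, Nat.succ_eq_add_one,
        List.getElem?_cons_succ, List.zip_cons_cons, List.foldl_cons]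
      exact ih ys (h x y s) (by simpa using hlen)

-- B's inner step at a fixed row index, with the Int index read off as a Nat
theorem pv_stepB_eq (cols : List String) (j : Nat) (d : PySem.Dict String String)
    (q : String × List (List (String × String))) :
    (if ((j : Int)) < (q.2.length : Int) then
        pvFillCols q.1 cols (PySem.Dict.ofList ((PySem.List.pyGet? q.2 (j : Int)).getD [])) d
      else d) = pvStep cols j d q := by
  unfold pvStep
  simp [List.getD_eq_getElem?_getD]

-- ===== VERDICT (by name: the statement is the Claim_ definition above) =====
theorem merge_predictions_spec : Claim_equal_merge_predictions := by
  intro el ml cols _ hpre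
  unfold Spec_merge_predictions
  obtain ⟨hlen, -, -⟩ := hpre
  match el, ml with
  | [], _ => rfl
  | first :: rest, [] => simp at hlen
  | first :: rest, m0 :: mt =>
    unfold merge_predictions merge_predictions_alt
    congr 1
    -- A: peel the i = 0 iteration of the outer loop; reduce its index lookups
    rw [List.length_cons, List.range_succ_eq_map, List.foldl_cons, List.foldl_map]
    simp only [Nat.cast_zero, PySem.List.pyGet?_zero_cons, Option.getD_some,
      if_true, Nat.succ_eq_add_one]
    rw [show ((PySem.List.enumerate (first.map PySem.Dict.ofList)).foldl
        (fun ne p => (ne ++ [pvBaseDict cols p.2]).modify p.1.toNat (pvFillCols m0 cols p.2)) [])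
        = (first.map PySem.Dict.ofList).map (fun e => pvFillCols m0 cols e (pvBaseDict cols e)) from by
      simpa using pv_pass0 m0 cols (first.map PySem.Dict.ofList) []]
    -- A: in the later iterations the branch i = 0 is dead and the index lookups drop the head
    simp only [PySem.List.pyGet?_natCast, List.getElem?_cons_succ, Nat.add_eq_zero_iff,
      one_ne_zero, and_false, if_false]
    -- A: the remaining iterations as a zip fold over (mt, rest)
    rw [pv_range_zip
      (fun ex m (ne : List (PySem.Dict String String)) =>
        (PySem.List.enumerate (ex.map PySem.Dict.ofList)).foldl
          (fun ne p => ne.modify p.1.toNat (pvFillCols m cols p.2)) ne)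
      rest mt _ (by simpa using hlen)]
    -- A: each later pass rewritten as zipWith plus the untouched remainder
    rw [show (fun (s : List (PySem.Dict String String)) (q : String × List (List (String × String))) =>
          (PySem.List.enumerate (q.2.map PySem.Dict.ofList)).foldl
            (fun ne p => ne.modify p.1.toNat (pvFillCols q.1 cols p.2)) s)
        = (fun s q =>
            List.zipWith (fun e d => pvFillCols q.1 cols e d) (q.2.map PySem.Dict.ofList) s
              ++ s.drop (q.2.map PySem.Dict.ofList).length) from by
      funext s q
      simpa using pv_pass_split (fun e d => pvFillCols q.1 cols e d) (q.2.map PySem.Dict.ofList) [] s]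
    -- B: the append-one-row loop is a map over the enumerated first list
    rw [PySem.List.foldl_append_singleton_eq_map]
    -- compare pointwise
    apply List.ext_getElem?
    intro j
    rw [pv_chain cols (mt.zip rest) _ j, List.nil_append]
    simp only [List.getElem?_map, PySem.List.getElem?_enumerate, Option.map_map]
    cases hj : first[j]? with
    | none => simp
    | some raw =>
      have hjlt : j < first.length := (List.getElem?_eq_some_iff.mp hj).1
      simp only [Option.map_some, Function.comp, zero_add]
      congr 1
      -- B's row: peel the (m0, first) step of the zip fold
      rw [List.zip_cons_cons, List.foldl_cons]
      -- the remaining steps are pvStep at row j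
      rw [show (fun (d : PySem.Dict String String) (q : String × List (List (String × String))) =>
            if ((j : Int)) < (q.2.length : Int) then
              pvFillCols q.1 cols (PySem.Dict.ofList ((PySem.List.pyGet? q.2 (j : Int)).getD [])) d
            else d)
          = (fun d q => pvStep cols j d q) from by
        funext d q; exact pv_stepB_eq cols j d q]
      -- and the first step is exactly A's i = 0 value at row j
      rw [pv_stepB_eq cols j _ (m0, first)]
      unfold pvStep
      rw [if_pos hjlt]
      congr 2
      rw [List.getD_eq_getElem?_getD, hj]
      rfl
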